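-- pv_equiv track=rewrite | github.com/itc-n23033/PG2 | TextBook/CH07/isPhoneNumber.py | is_post_code
-- ===== SOURCE A (Python) =====
-- def is_post_code(text):
--     if len(text) != 12:
--         return False
--     for i in range(0, 3):
--         if not text[i].isdecimal():
--             return False
--     if text[3] != '-':
--         return False
--     for i in range(4, 7):
--         if not text[i].isdecimal():
--             return False
--         if text[7] != '-':
--             return False
--         for i in range(8, 12):
--             if not text[i].isdecimal():
--                 return False
--     return True
-- ===== SOURCE B (Python) =====
-- def is_post_code(text):
--     if len(text) != 12:
--         return False
--     for i, ch in enumerate(text):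
--         if i in (3, 7):
--             if ch != '-':
--                 return False
--         elif not ch.isdecimal():
--             return False
--     return True
-- ===== Notes on version B (the rewrite author's own statement) =====
-- stated objective: simpler
-- what changed: Replaces A's three separate index-range loops with interleaved dash guards (and redundant re-checks from A's odd nesting) by one uniform pass over enumerate(text) driven by the dash-position table {3, 7}.
import Mathlib
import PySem

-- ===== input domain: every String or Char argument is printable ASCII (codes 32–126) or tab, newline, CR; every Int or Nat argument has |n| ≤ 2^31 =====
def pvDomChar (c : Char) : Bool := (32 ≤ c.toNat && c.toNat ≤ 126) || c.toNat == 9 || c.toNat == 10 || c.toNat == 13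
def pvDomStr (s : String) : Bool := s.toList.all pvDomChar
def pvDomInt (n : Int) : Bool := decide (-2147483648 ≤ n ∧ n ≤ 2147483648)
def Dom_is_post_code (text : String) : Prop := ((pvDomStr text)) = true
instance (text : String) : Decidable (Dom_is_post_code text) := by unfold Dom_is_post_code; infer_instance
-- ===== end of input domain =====

-- B replaces A's three separate index-range loops with interleaved dash guards by one
-- uniform pass over enumerate(text) driven by the dash-position table {3, 7} (objective: simpler).
-- Python's str.isdecimal on one character is ported as PySem.Chars.isdigit: exact on the ASCII domain.

-- ===== PORT A =====
-- text[i].isdecimal() for an in-range index (guaranteed by the length-12 guard)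
def pvDecAt (s : List Char) (i : Int) : Bool :=
  PySem.Chars.isdigit (PySem.List.pyGetD s i ' ')

-- A's body after the length guard, kept with A's (mis-indented) loop structure:
-- each iteration of range(4, 7) re-checks text[7] and the whole range(8, 12) block
def pvABody (s : List Char) : Bool :=
  if ¬ ((PySem.List.pyRange 0 3 1).all fun i => pvDecAt s i) then false
  else if PySem.List.pyGetD s 3 ' ' ≠ '-' then false
  else
    (PySem.List.pyRange 4 7 1).all fun i =>
      pvDecAt s i &&
      (PySem.List.pyGetD s 7 ' ' == '-') &&
      ((PySem.List.pyRange 8 12 1).all fun j => pvDecAt s j)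

def is_post_code (text : String) : Bool :=
  if PySem.Str.len text ≠ 12 then false
  else pvABody text.toList

-- ===== PORT B =====
-- B's single pass: dash at the table positions {3, 7}, decimal everywhere else
def pvBBody (s : List Char) : Bool :=
  (PySem.List.enumerate s 0).all fun p =>
    if p.1 = 3 ∨ p.1 = 7 then p.2 == '-' else PySem.Chars.isdigit p.2

def is_post_code_alt (text : String) : Bool :=
  if PySem.Str.len text ≠ 12 then false
  else pvBBody text.toList

-- ===== PRECONDITION & SPEC =====
def Spec_is_post_code (text : String) (out : Bool) : Prop := out = is_post_code_alt text
instance (text : String) (out : Bool) : Decidable (Spec_is_post_code text out) := by unfold Spec_is_post_code; infer_instance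

-- ===== CLAIM (what is proved, stated in full; the proofs are below) =====
def Claim_equal_is_post_code : Prop := ∀ (text : String), Dom_is_post_code text → Spec_is_post_code text (is_post_code text)

-- ===== LEMMAS AND PROOFS =====

-- On any 12-character list the two loop bodies agree: destructure the 12 characters,
-- evaluate both loops, and compare the resulting boolean conjunctions propositionally.
lemma pvBody_eq (s : List Char) (hl : s.length = 12) : pvABody s = pvBBody s := by
  rcases s with _ | ⟨c0, s⟩; · simp at hl
  rcases s with _ | ⟨c1, s⟩; · simp at hl
  rcases s with _ | ⟨c2, s⟩; · simp at hl
  rcases s with _ | ⟨c3, s⟩; · simp at hl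
  rcases s with _ | ⟨c4, s⟩; · simp at hl
  rcases s with _ | ⟨c5, s⟩; · simp at hl
  rcases s with _ | ⟨c6, s⟩; · simp at hl
  rcases s with _ | ⟨c7, s⟩; · simp at hl
  rcases s with _ | ⟨c8, s⟩; · simp at hl
  rcases s with _ | ⟨c9, s⟩; · simp at hl
  rcases s with _ | ⟨c10, s⟩; · simp at hl
  rcases s with _ | ⟨c11, s⟩; · simp at hl
  rcases s with _ | ⟨c12, s⟩
  case cons => simp at hl
  simp only [pvABody, pvBBody, pvDecAt,
    show PySem.List.pyRange 0 3 1 = [0, 1, 2] from by decide,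
    show PySem.List.pyRange 4 7 1 = [4, 5, 6] from by decide,
    show PySem.List.pyRange 8 12 1 = [8, 9, 10, 11] from by decide,
    PySem.List.enumerate_cons, PySem.List.enumerate_nil,
    List.all_cons, List.all_nil]
  simp only [pysem]
  norm_num
  rw [Bool.eq_iff_iff]
  simp only [Bool.and_eq_true, decide_eq_true_eq, beq_iff_eq]
  tauto

-- ===== VERDICT (by name: the statement is the Claim_ definition above) =====
theorem is_post_code_spec : Claim_equal_is_post_code := by
  intro text _
  unfold Spec_is_post_code is_post_code is_post_code_alt
  have h0 : PySem.Str.len text = (text.toList.length : Int) := by simp [pysem]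
  rw [h0]
  by_cases hl : text.toList.length = 12
  · have hc : ¬ ((text.toList.length : Int) ≠ 12) := by omega
    rw [if_neg hc, if_neg hc, pvBody_eq _ hl]
  · have hc : (text.toList.length : Int) ≠ 12 := by omega
    rw [if_pos hc, if_pos hc]
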